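-- pv_equiv track=rewrite | github.com/google/myelin-acorn-electron-hardware | third_party/uef-utils/UEFtrans.py | read_uef_details
-- ===== SOURCE A (Python) =====
-- def find_next_chunk(chunks, pos, IDs):
-- 	"""Find the next chunk from the position specified which has an ID in the list of IDs given."""
--
-- 	while pos < len(chunks):
--
-- 		if chunks[pos][0] in IDs:
--
-- 			# Found a chunk with ID in the list
-- 			return pos, chunks[pos]
--
-- 		# Otherwise continue looking
-- 		pos = pos + 1
--
-- 	return None, None
--
-- def read_uef_details(chunks):
-- 	"""Return details about the UEF file and its contents."""
--
-- 	pos, chunk = find_next_chunk(chunks, 0, [0x0])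
--
-- 	if pos == None:
--
-- 		originator = 'Unknown'
--
-- 	elif chunk[1] == '':
--
-- 		originator = 'Unknown'
-- 	else:
-- 		originator = chunk[1]
--
-- 	pos, chunk = find_next_chunk(chunks, 0, [0x5])
--
-- 	if pos == None:
--
-- 		machine, keyboard = 'Unknown', 'Unknown'
--
-- 	else:
--
-- 		machines = ('BBC Model A', 'Electron', 'BBC Model B', 'BBC Master')
-- 		keyboards = ('Any layout', 'Physical layout', 'Remapped')
--
-- 		machine = ord(chunk[1][0]) & 0x0f
-- 		keyboard = (ord(chunk[1][0]) & 0xf0) >> 4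
--
-- 		if machine < len(machines):
-- 			machine = machines[machine]
-- 		else:
-- 			machine = 'Unknown'
--
-- 		if keyboard < len(keyboards):
-- 			keyboard = keyboards[keyboard]
-- 		else:
-- 			keyboard = 'Unknown'
--
-- 	pos, chunk = find_next_chunk(chunks, 0, [0xff00])
--
-- 	if pos == None:
--
-- 		emulator = 'Unknown'
--
-- 	elif chunk[1] == '':
--
-- 		emulator = 'Unknown'
-- 	else:
-- 		emulator = chunk[1]
--
--
-- 	# Remove trailing null bytes
-- 	while originator[-1] == '\000':
--
-- 		originator = originator[:-1]
--
-- 	while emulator[-1] == '\000':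
--
-- 		emulator = emulator[:-1]
--
-- 	features = ''
-- 	if find_next_chunk(chunks, 0, [0x1])[0] != None:
-- 		features = features + '\n' + 'Instructions'
-- 	if find_next_chunk(chunks, 0, [0x2])[0] != None:
-- 		features = features + '\n' + 'Credits'
-- 	if find_next_chunk(chunks, 0, [0x3])[0] != None:
-- 		features = features + '\n' + 'Inlay'
--
-- 	return originator, machine, keyboard, emulator, features
-- ===== SOURCE B (Python) =====
-- def read_uef_details(chunks):
-- 	"""Return details about the UEF file and its contents."""
--
-- 	# One pass: map each chunk ID to the first chunk carrying it.
-- 	first = {}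
-- 	for chunk in chunks:
-- 		first.setdefault(chunk[0], chunk[1])
--
-- 	data = first.get(0x0)
-- 	if data is None or data == '':
-- 		originator = 'Unknown'
-- 	else:
-- 		originator = data
--
-- 	data = first.get(0x5)
-- 	if data is None:
-- 		machine, keyboard = 'Unknown', 'Unknown'
-- 	else:
-- 		machines = ('BBC Model A', 'Electron', 'BBC Model B', 'BBC Master')
-- 		keyboards = ('Any layout', 'Physical layout', 'Remapped')
-- 		byte = ord(data[0])
-- 		m = byte & 0x0f
-- 		k = (byte & 0xf0) >> 4
-- 		machine = machines[m] if m < len(machines) else 'Unknown'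
-- 		keyboard = keyboards[k] if k < len(keyboards) else 'Unknown'
--
-- 	data = first.get(0xff00)
-- 	if data is None or data == '':
-- 		emulator = 'Unknown'
-- 	else:
-- 		emulator = data
--
-- 	# Remove trailing null bytes
-- 	while originator[-1] == '\000':
-- 		originator = originator[:-1]
-- 	while emulator[-1] == '\000':
-- 		emulator = emulator[:-1]
--
-- 	features = ''.join('\n' + name for ID, name in
-- 		((0x1, 'Instructions'), (0x2, 'Credits'), (0x3, 'Inlay')) if ID in first)
--
-- 	return originator, machine, keyboard, emulator, features
-- ===== Notes on version B (the rewrite author's own statement) =====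
-- stated objective: simpler
-- what changed: Replaces the six separate position-scanning find_next_chunk passes with one pass that records the first chunk per ID in a dict (setdefault), all fields then derived by constant-time lookups; the null-stripping is kept as Python A's while-loops.
import Mathlib
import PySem

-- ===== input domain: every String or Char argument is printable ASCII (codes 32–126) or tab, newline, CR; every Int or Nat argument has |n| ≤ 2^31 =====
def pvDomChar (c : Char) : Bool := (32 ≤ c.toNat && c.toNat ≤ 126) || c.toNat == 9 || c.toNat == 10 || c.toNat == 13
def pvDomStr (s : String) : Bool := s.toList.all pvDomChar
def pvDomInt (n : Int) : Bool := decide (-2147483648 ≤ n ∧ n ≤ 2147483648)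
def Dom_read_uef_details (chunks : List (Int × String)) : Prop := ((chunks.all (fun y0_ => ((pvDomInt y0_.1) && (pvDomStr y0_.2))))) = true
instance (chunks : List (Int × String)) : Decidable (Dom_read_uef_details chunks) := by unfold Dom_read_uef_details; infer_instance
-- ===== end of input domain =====

-- B replaces A's six separate find_next_chunk scans by one setdefault pass building a first-chunk-per-ID
-- dict, every field then read by lookup (objective: simpler); the null-stripping while-loops are kept as in A.


-- ===== PORT A =====
-- while pos < len(chunks): if chunks[pos][0] in IDs: return pos, chunks[pos]; pos += 1  (else None, None)
def findNextChunk (chunks : List (Int × String)) (pos : Nat) (IDs : List Int) : Option (Nat × (Int × String)) :=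
  if h : pos < chunks.length then
    if IDs.contains chunks[pos].1 then some (pos, chunks[pos])
    else findNextChunk chunks (pos + 1) IDs
  else none
termination_by chunks.length - pos

-- while s[-1] == '\000': s = s[:-1]   (Python raises IndexError when s becomes empty — that point is
-- unreachable on Dom strings, which contain no NUL; there pyGet? = none and we exit the loop)
def stripNulls (s : String) : String :=
  if h : PySem.Str.pyGet? s (-1) = some '\x00' then stripNulls (PySem.Str.slice s none (some (-1))) else s
termination_by s.toList.length
decreasing_by
  rw [PySem.Str.slice_to_neg_one]
  have hne : s.toList ≠ [] := by
    intro hnil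
    rw [PySem.Str.pyGet?_eq, PySem.Chars.pyGet?_eq_listPyGet?, hnil] at h
    simp [PySem.List.pyGet?, PySem.List.pyIdx?] at h
  have h2 := List.length_pos_iff.mpr hne
  have h1 : s.toList.length = s.length := String.length_toList
  simp [List.length_dropLast]
  omega

def read_uef_details (chunks : List (Int × String)) : String × String × String × String × String :=
  let originator :=
    match findNextChunk chunks 0 [0x0] with
    | none => "Unknown"
    | some (_, chunk) => if chunk.2 = "" then "Unknown" else chunk.2
  let mk : String × String :=
    match findNextChunk chunks 0 [0x5] with
    | none => ("Unknown", "Unknown")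
    | some (_, chunk) =>
      let machines := ["BBC Model A", "Electron", "BBC Model B", "BBC Master"]
      let keyboards := ["Any layout", "Physical layout", "Remapped"]
      -- ord(chunk[1][0]): Python raises IndexError when chunk[1] = '' — excluded by Pre_; getD is a placeholder there
      let b := ((PySem.Str.pyGet? chunk.2 0).getD ' ').toNat
      let machine := b &&& 0x0f
      let keyboard := (b &&& 0xf0) >>> 4
      ((if machine < machines.length then machines[machine]! else "Unknown"),
       (if keyboard < keyboards.length then keyboards[keyboard]! else "Unknown"))
  let emulator :=
    match findNextChunk chunks 0 [0xff00] with
    | none => "Unknown"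
    | some (_, chunk) => if chunk.2 = "" then "Unknown" else chunk.2
  let originator := stripNulls originator
  let emulator := stripNulls emulator
  let features := ""
  let features := if (findNextChunk chunks 0 [0x1]).isSome then features ++ "\n" ++ "Instructions" else features
  let features := if (findNextChunk chunks 0 [0x2]).isSome then features ++ "\n" ++ "Credits" else features
  let features := if (findNextChunk chunks 0 [0x3]).isSome then features ++ "\n" ++ "Inlay" else features
  (originator, mk.1, mk.2, emulator, features)

-- ===== PORT B =====
def read_uef_details_alt (chunks : List (Int × String)) : String × String × String × String × String :=
  -- first = {}; for chunk in chunks: first.setdefault(chunk[0], chunk[1])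
  let first := chunks.foldl (fun d c => d.setdefault c.1 c.2) PySem.Dict.empty
  let originator :=
    match first.get? 0x0 with
    | none => "Unknown"
    | some s => if s = "" then "Unknown" else s
  let mk : String × String :=
    match first.get? 0x5 with
    | none => ("Unknown", "Unknown")
    | some s =>
      let machines := ["BBC Model A", "Electron", "BBC Model B", "BBC Master"]
      let keyboards := ["Any layout", "Physical layout", "Remapped"]
      -- ord(data[0]): Python raises IndexError when data = '' — excluded by Pre_; getD is a placeholder there
      let b := ((PySem.Str.pyGet? s 0).getD ' ').toNat
      let m := b &&& 0x0f
      let k := (b &&& 0xf0) >>> 4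
      ((if m < machines.length then machines[m]! else "Unknown"),
       (if k < keyboards.length then keyboards[k]! else "Unknown"))
  let emulator :=
    match first.get? 0xff00 with
    | none => "Unknown"
    | some s => if s = "" then "Unknown" else s
  let originator := stripNulls originator
  let emulator := stripNulls emulator
  let features := PySem.Str.join ""
    ((([((0x1 : Int), "Instructions"), (0x2, "Credits"), (0x3, "Inlay")].filter
        (fun p => first.contains p.1)).map (fun p => "\n" ++ p.2)))
  (originator, mk.1, mk.2, emulator, features)

-- ===== PRECONDITION & SPEC =====
-- Pre_ excludes exactly the inputs whose FIRST chunk with ID 0x5 carries empty data: there Python A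
-- raises IndexError on ord(chunk[1][0]) (and B raises identically).
def Pre_read_uef_details (chunks : List (Int × String)) : Prop :=
  ((chunks.find? (fun c => c.1 == 0x5)).all (fun c => !(c.2 == ""))) = true
instance (chunks : List (Int × String)) : Decidable (Pre_read_uef_details chunks) := by
  unfold Pre_read_uef_details; infer_instance
def pvWitness_read_uef_details : (List (Int × String)) :=
  [(0, "Acorn Electron"), (5, "!"), (1, "hello"), (0xff00, "ElectrEm")]
def Spec_read_uef_details (chunks : List (Int × String)) (out : String × String × String × String × String) : Prop := out = read_uef_details_alt chunks
instance (chunks : List (Int × String)) (out : String × String × String × String × String) : Decidable (Spec_read_uef_details chunks out) := by unfold Spec_read_uef_details; infer_instance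

-- ===== CLAIM (what is proved, stated in full; the proofs are below) =====
def Claim_equal_read_uef_details : Prop := ∀ (chunks : List (Int × String)), Dom_read_uef_details chunks → Pre_read_uef_details chunks → Spec_read_uef_details chunks (read_uef_details chunks)

-- ===== LEMMAS AND PROOFS =====

-- A's scan from position pos finds exactly the first matching chunk of the remaining list.
theorem findNextChunk_eq_find? (chunks : List (Int × String)) (pos : Nat) (IDs : List Int) :
    (findNextChunk chunks pos IDs).map (·.2)
      = (chunks.drop pos).find? (fun c => IDs.contains c.1) := by
  induction pos using findNextChunk.induct chunks IDs with
  | case1 pos h hc =>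
    rw [findNextChunk]
    simp only [h, dif_pos, hc, if_pos]
    rw [List.drop_eq_getElem_cons h, List.find?_cons]
    simp only [List.contains_iff_mem] at hc
    simp [hc]
  | case2 pos h hc ih =>
    rw [findNextChunk]
    simp only [h, dif_pos, hc, if_neg, Bool.false_eq_true, not_false_eq_true]
    rw [List.drop_eq_getElem_cons h, List.find?_cons, ih]
    simp only [List.contains_iff_mem] at hc
    simp [hc]
  | case3 pos h =>
    rw [findNextChunk]
    simp only [h]
    rw [List.drop_eq_nil_of_le (by omega)]
    simp

-- The setdefault fold keeps the FIRST value seen per key.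
theorem setdefault_foldl_get? (chunks : List (Int × String)) (d : PySem.Dict Int String) (k : Int) :
    (chunks.foldl (fun d c => d.setdefault c.1 c.2) d).get? k
      = (d.get? k).or ((chunks.find? (fun c => c.1 == k)).map (·.2)) := by
  induction chunks generalizing d with
  | nil => simp
  | cons c t ih =>
    rw [List.foldl_cons, ih, List.find?_cons]
    by_cases hk : c.1 = k
    · subst hk
      rw [PySem.Dict.get?_setdefault_self]
      cases d.get? c.1 <;> simp
    · have h1 : (d.setdefault c.1 c.2).get? k = d.get? k := by
        by_cases hc : d.contains c.1 = true
        · rw [PySem.Dict.setdefault_of_contains d c.2 hc]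
        · rw [PySem.Dict.setdefault_of_not_contains d c.2 (by simpa using hc),
            PySem.Dict.get?_insert_of_ne d c.2 (fun h => hk h.symm)]
      have hk2 : (c.1 == k) = false := by simpa using hk
      rw [h1, hk2]

-- B's dict lookup equals the data field of the first matching chunk A's scan finds.
theorem first_get?_eq (chunks : List (Int × String)) (i : Int) :
    (chunks.foldl (fun d c => d.setdefault c.1 c.2) PySem.Dict.empty).get? i
      = (findNextChunk chunks 0 [i]).map (fun p => p.2.2) := by
  rw [setdefault_foldl_get?, PySem.Dict.get?_empty, Option.none_or]
  have h := findNextChunk_eq_find? chunks 0 [i]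
  rw [List.drop_zero] at h
  have hp : (fun (c : Int × String) => c.1 == i) = (fun c => [i].contains c.1) := by
    funext c
    rw [List.contains_cons, List.contains_nil, Bool.or_false]
  rw [hp, ← h, Option.map_map]
  rfl

-- ===== VERDICT (by name: the statement is the Claim_ definition above) =====
theorem read_uef_details_spec : Claim_equal_read_uef_details := by
  intro chunks _ _
  unfold Spec_read_uef_details read_uef_details read_uef_details_alt
  simp only [PySem.Dict.contains_eq_isSome_get?, first_get?_eq, Option.isSome_map]
  cases h0 : findNextChunk chunks 0 [0x0] <;>
  cases h5 : findNextChunk chunks 0 [0x5] <;>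
  cases hf : findNextChunk chunks 0 [0xff00] <;>
  cases h1 : (findNextChunk chunks 0 [0x1]).isSome <;>
  cases h2 : (findNextChunk chunks 0 [0x2]).isSome <;>
  cases h3 : (findNextChunk chunks 0 [0x3]).isSome <;>
  simp [h1, h2, h3, PySem.Str.join, PySem.Chars.join, Prod.ext_iff] <;> decide
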